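-- pv_equiv track=rewrite | github.com/CISPA-SysSec/brand_impersonation | code/accounts_collection_and_analysis/analysis.py | _clean_string_found
-- ===== SOURCE A (Python) =====
-- def _clean_string_found(_str):
--     try:
--         if _str is None:
--             return 'not found'
--         _clean = ["\n", ",", "\r", '"', "'"]
--
--         for c in _clean:
--             _str = _str.replace(c, " ")
--
--         _str = _str.strip()
--         return _str
--     except:
--         pass
--     return _str
-- ===== SOURCE B (Python) =====
-- def _clean_string_found(_str):
--     if _str is None:
--         return 'not found'
--     punct = {"\n", ",", "\r", '"', "'"}
--     return ''.join(' ' if ch in punct else ch for ch in _str).strip()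
-- ===== Notes on version B (the rewrite author's own statement) =====
-- stated objective: idiomatic
-- what changed: B replaces the loop of five whole-string str.replace passes with a single pass over the characters (join of a conditional comprehension against a punctuation set) followed by strip.
import Mathlib
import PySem

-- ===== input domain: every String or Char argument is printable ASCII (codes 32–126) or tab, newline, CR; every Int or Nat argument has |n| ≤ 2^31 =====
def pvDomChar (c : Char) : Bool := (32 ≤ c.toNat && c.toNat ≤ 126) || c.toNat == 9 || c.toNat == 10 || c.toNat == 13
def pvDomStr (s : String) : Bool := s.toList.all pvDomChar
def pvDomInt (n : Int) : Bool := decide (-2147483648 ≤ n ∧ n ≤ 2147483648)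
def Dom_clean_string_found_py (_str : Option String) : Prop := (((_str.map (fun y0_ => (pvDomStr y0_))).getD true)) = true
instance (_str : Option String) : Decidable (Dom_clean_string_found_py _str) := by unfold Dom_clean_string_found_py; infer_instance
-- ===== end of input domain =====

-- B does one pass over the characters (map against a punctuation set) instead of A's
-- five sequential whole-string replaces; same result, proved equal on all inputs.

-- ===== PORT A =====
def clean_string_found_py (_str : Option String) : String :=
  match _str with
  | none => "not found"
  | some s =>
    let _clean : List String := ["\n", ",", "\r", "\"", "'"]
    let s := _clean.foldl (fun acc c => PySem.Str.replace acc c " ") s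
    PySem.Str.strip s

-- ===== PORT B =====
def clean_string_found_py_alt (_str : Option String) : String :=
  match _str with
  | none => "not found"
  | some s =>
    let punct : List Char := ['\n', ',', '\r', '"', '\'']
    PySem.Str.strip (String.ofList (s.toList.map (fun ch => if ch ∈ punct then ' ' else ch)))

-- ===== PRECONDITION & SPEC =====
def Spec_clean_string_found_py (_str : Option String) (out : String) : Prop := out = clean_string_found_py_alt _str
instance (_str : Option String) (out : String) : Decidable (Spec_clean_string_found_py _str out) := by unfold Spec_clean_string_found_py; infer_instance

-- ===== CLAIM (what is proved, stated in full; the proofs are below) =====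
def Claim_equal_clean_string_found_py : Prop := ∀ (_str : Option String), Dom_clean_string_found_py _str → Spec_clean_string_found_py _str (clean_string_found_py _str)

-- ===== LEMMAS AND PROOFS =====

-- replacing a single char by a single char is a pointwise map
theorem replace_go_single (c r : Char) : ∀ (fuel : Nat) (l acc : List Char), l.length ≤ fuel →
    PySem.Chars.replace.go [c] [r] fuel l acc
      = acc.reverse ++ l.map (fun x => if x = c then r else x) := by
  intro fuel
  induction fuel with
  | zero =>
    intro l acc h
    have : l = [] := List.length_eq_zero_iff.mp (Nat.le_zero.mp h)
    subst this
    rw [PySem.Chars.replace.go.eq_def]; simp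
  | succ n ih =>
    intro l acc h
    cases l with
    | nil => rw [PySem.Chars.replace.go.eq_def]; simp
    | cons x t =>
      rw [PySem.Chars.replace.go.eq_def]
      simp only [List.isPrefixOf, Bool.and_true]
      by_cases hx : c = x
      · subst hx
        simp only [beq_self_eq_true, if_pos]
        rw [ih _ _ (by simpa using Nat.le_of_succ_le_succ h)]
        simp
      · have : (c == x) = false := by simp [hx]
        simp only [this, Bool.false_eq_true, if_false]
        rw [ih _ _ (by simpa using Nat.le_of_succ_le_succ h)]
        simp [Ne.symm hx]

theorem replace_single (c r : Char) (l : List Char) :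
    PySem.Chars.replace l [c] [r] = l.map (fun x => if x = c then r else x) := by
  simp [PySem.Chars.replace]
  simpa using replace_go_single c r l.length l [] (le_refl _)

-- ===== VERDICT (by name: the statement is the Claim_ definition above) =====
theorem clean_string_found_py_spec : Claim_equal_clean_string_found_py := by
  intro _str _
  unfold Spec_clean_string_found_py clean_string_found_py clean_string_found_py_alt
  cases _str with
  | none => rfl
  | some s =>
    simp only [List.foldl]
    apply congrArg PySem.Str.strip
    apply String.ext   -- equal char lists, equal strings
    simp only [PySem.Str.toList_replace, String.toList_ofList]
    simp only [show ("\n".toList) = ['\n'] from rfl, show (",".toList) = [','] from rfl,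
      show ("\r".toList) = ['\r'] from rfl, show ("\"".toList) = ['"'] from rfl,
      show ("'".toList) = ['\''] from rfl, show (" ".toList) = [' '] from rfl,
      replace_single, List.map_map]
    apply List.map_congr_left
    intro ch _
    simp only [Function.comp]
    by_cases h1 : ch = '\n' <;> by_cases h2 : ch = ',' <;> by_cases h3 : ch = '\r' <;>
      by_cases h4 : ch = '"' <;> by_cases h5 : ch = '\'' <;>
      simp_all
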